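-- pv_equiv track=rewrite | github.com/Musso12138/PyRepoScanner4NIO | PyRepoScanner/utils/poison_detection_tools.py | detect_permutation
-- ===== SOURCE A (Python) =====
-- def detect_permutation(str1: str, str2: str):
--     """检测两个字符串间的一位置换关系
--
--     :return: True/False
--     """
--     if len(str1) != len(str2):
--         return False
--     diff_cnt = 0
--     perm1 = None
--     perm2 = None
--     for i in range(len(str1)):
--         if str1[i] != str2[i]:
--             diff_cnt += 1
--             if diff_cnt == 1:
--                 perm1 = str1[i]
--                 perm2 = str2[i]
--             elif diff_cnt == 2:
--                 if str1[i] != perm2: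
--                     return False
--                 if str2[i] != perm1:
--                     return False
--             elif diff_cnt > 2:
--                 return False
--
--     if diff_cnt == 2:
--         return True
--     return False
-- ===== SOURCE B (Python) =====
-- def _common_prefix_len(s1, s2):
--     i = 0
--     while i < len(s1) and s1[i] == s2[i]:
--         i += 1
--     return i
--
--
-- def detect_permutation(str1: str, str2: str):
--     if len(str1) != len(str2):
--         return False
--     n = len(str1)
--     i = _common_prefix_len(str1, str2)
--     if i == n:
--         return False
--     j = n - 1 - _common_prefix_len(str1[::-1], str2[::-1])
--     if j == i:
--         return False
--     return str1[i] == str2[j] and str1[j] == str2[i] and str1[i + 1:j] == str2[i + 1:j]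
-- ===== Notes on version B (the rewrite author's own statement) =====
-- stated objective: alternative
-- what changed: B locates the first and last mismatch positions by a common-prefix scan from the front and from the back (on the reversed strings), then decides with one swap check at those two indices plus a slice-equality test of the region between them, instead of A's single-pass diff_cnt/perm1/perm2 state machine.
import Mathlib
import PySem

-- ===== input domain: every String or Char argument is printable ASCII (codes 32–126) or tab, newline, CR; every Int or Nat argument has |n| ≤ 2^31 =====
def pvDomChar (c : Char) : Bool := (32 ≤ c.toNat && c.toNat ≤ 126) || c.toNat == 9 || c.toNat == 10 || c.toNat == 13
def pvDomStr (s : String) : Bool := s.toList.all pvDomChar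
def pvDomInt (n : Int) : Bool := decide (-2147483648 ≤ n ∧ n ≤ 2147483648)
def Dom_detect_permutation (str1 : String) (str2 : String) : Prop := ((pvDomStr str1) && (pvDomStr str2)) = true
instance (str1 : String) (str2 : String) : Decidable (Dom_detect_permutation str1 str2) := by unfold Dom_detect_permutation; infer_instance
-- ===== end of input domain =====

-- B replaces A's single-pass diff_cnt/perm1/perm2 state machine by a prefix/suffix scan:
-- it finds the first mismatch from the front and the last mismatch from the back (common
-- prefix of the reversed strings), then does one swap check at those two indices plus a
-- slice-equality test of the region between them (alternative decomposition, same cost).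

-- ===== PORT A =====
-- A's for-loop over i in range(len(str1)), reading str1[i]/str2[i], carrying
-- diff_cnt and perm1/perm2 (None → Option Char) with early returns; after the
-- length guard it walks the two char lists in lockstep.
def detect_permutation_loop : List Char → List Char → Int → Option Char → Option Char → Bool
  | [], [], diff_cnt, _, _ => diff_cnt == 2
  | c1 :: t1, c2 :: t2, diff_cnt, perm1, perm2 =>
      if c1 ≠ c2 then
        let diff_cnt' := diff_cnt + 1
        if diff_cnt' == 1 then
          detect_permutation_loop t1 t2 diff_cnt' (some c1) (some c2)
        else if diff_cnt' == 2 then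
          if some c1 ≠ perm2 then false
          else if some c2 ≠ perm1 then false
          else detect_permutation_loop t1 t2 diff_cnt' perm1 perm2
        else false
      else detect_permutation_loop t1 t2 diff_cnt perm1 perm2
  | _, _, _, _, _ => false  -- unreachable: both lists have equal length after the guard

def detect_permutation (str1 : String) (str2 : String) : Bool :=
  if str1.toList.length ≠ str2.toList.length then false
  else detect_permutation_loop str1.toList str2.toList 0 none none

-- ===== PORT B =====
-- _common_prefix_len: 'i = 0; while i < len(s1) and s1[i] == s2[i]: i += 1; return i',
-- advancing through both strings in lockstep.
def common_prefix_len : List Char → List Char → Nat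
  | a :: t1, b :: t2 => if a = b then common_prefix_len t1 t2 + 1 else 0
  | _, _ => 0

-- On the reachable branches i and j are in range, so Python's str1[i]/str2[j] is
-- List.getD, and the slice str1[i+1:j] (0 ≤ i+1 ≤ j ≤ n) is drop (i+1) then take (j-(i+1)).
def detect_permutation_alt (str1 : String) (str2 : String) : Bool :=
  let l1 := str1.toList
  let l2 := str2.toList
  if l1.length ≠ l2.length then false
  else
    let n := l1.length
    let i := common_prefix_len l1 l2
    if i = n then false
    else
      let j := n - 1 - common_prefix_len l1.reverse l2.reverse
      if j = i then false
      else
        (l1.getD i ' ' == l2.getD j ' ') && (l1.getD j ' ' == l2.getD i ' ')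
          && ((l1.drop (i+1)).take (j - (i+1)) == (l2.drop (i+1)).take (j - (i+1)))

-- ===== PRECONDITION & SPEC =====
def Spec_detect_permutation (str1 : String) (str2 : String) (out : Bool) : Prop := out = detect_permutation_alt str1 str2
instance (str1 : String) (str2 : String) (out : Bool) : Decidable (Spec_detect_permutation str1 str2 out) := by unfold Spec_detect_permutation; infer_instance

-- ===== CLAIM (what is proved, stated in full; the proofs are below) =====
def Claim_equal_detect_permutation : Prop := ∀ (str1 : String) (str2 : String), Dom_detect_permutation str1 str2 → Spec_detect_permutation str1 str2 (detect_permutation str1 str2)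

-- ===== LEMMAS AND PROOFS =====

-- The list of mismatched character pairs (proof-side device shared by both directions).
def mismatches (l1 l2 : List Char) : List (Char × Char) :=
  (l1.zip l2).filter (fun p => p.1 ≠ p.2)

theorem mismatches_cons (c1 c2 : Char) (t1 t2 : List Char) :
    mismatches (c1 :: t1) (c2 :: t2)
      = if c1 = c2 then mismatches t1 t2 else (c1, c2) :: mismatches t1 t2 := by
  by_cases h : c1 = c2 <;> simp [mismatches, h]

theorem loop_cons_eq (c1 c2 : Char) (t1 t2 : List Char) (n : Int) (p1 p2 : Option Char)
    (h : c1 = c2) :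
    detect_permutation_loop (c1 :: t1) (c2 :: t2) n p1 p2
      = detect_permutation_loop t1 t2 n p1 p2 := by
  simp [detect_permutation_loop, h]

theorem loop0_cons_ne (c1 c2 : Char) (t1 t2 : List Char) (h : ¬ c1 = c2) :
    detect_permutation_loop (c1 :: t1) (c2 :: t2) 0 none none
      = detect_permutation_loop t1 t2 1 (some c1) (some c2) := by
  simp [detect_permutation_loop, h]

theorem loop1_cons_ne (c1 c2 a b : Char) (t1 t2 : List Char) (h : ¬ c1 = c2) :
    detect_permutation_loop (c1 :: t1) (c2 :: t2) 1 (some a) (some b)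
      = if c1 = b then
          (if c2 = a then detect_permutation_loop t1 t2 2 (some a) (some b) else false)
        else false := by
  by_cases h1 : c1 = b <;> by_cases h2 : c2 = a <;>
    simp [detect_permutation_loop, h, h1, h2] <;> (intro e; simp_all)

theorem loop2_cons_ne (c1 c2 : Char) (t1 t2 : List Char) (p1 p2 : Option Char)
    (h : ¬ c1 = c2) :
    detect_permutation_loop (c1 :: t1) (c2 :: t2) 2 p1 p2 = false := by
  simp [detect_permutation_loop, h]

-- After two mismatches A only scans for a third; it succeeds iff no further mismatch exists.
theorem loop_two (l1 : List Char) : ∀ (l2 : List Char), l1.length = l2.length →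
    ∀ (p1 p2 : Option Char),
    detect_permutation_loop l1 l2 2 p1 p2 = (mismatches l1 l2 == []) := by
  induction l1 with
  | nil => intro l2 h p1 p2; cases l2 <;> simp_all [detect_permutation_loop, mismatches]
  | cons c1 t1 ih =>
    intro l2 h p1 p2
    cases l2 with
    | nil => simp at h
    | cons c2 t2 =>
      simp only [List.length_cons, Nat.add_right_cancel_iff] at h
      rw [mismatches_cons]
      by_cases hc : c1 = c2
      · rw [loop_cons_eq _ _ _ _ _ _ _ hc, if_pos hc, ih t2 h]
      · rw [loop2_cons_ne _ _ _ _ _ _ hc, if_neg hc]; simp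

-- After one mismatch (perm1 = a, perm2 = b) A succeeds iff exactly one more
-- mismatch (c, d) remains and it swaps: c = b and d = a.
theorem loop_one (l1 : List Char) : ∀ (l2 : List Char), l1.length = l2.length →
    ∀ (a b : Char),
    detect_permutation_loop l1 l2 1 (some a) (some b)
      = (match mismatches l1 l2 with
         | [(c, d)] => a == d && b == c
         | _ => false) := by
  induction l1 with
  | nil => intro l2 h a b; cases l2 <;> simp_all [detect_permutation_loop, mismatches]
  | cons c1 t1 ih =>
    intro l2 h a b
    cases l2 with
    | nil => simp at h
    | cons c2 t2 =>
      simp only [List.length_cons, Nat.add_right_cancel_iff] at h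
      rw [mismatches_cons]
      by_cases hc : c1 = c2
      · rw [loop_cons_eq _ _ _ _ _ _ _ hc, if_pos hc, ih t2 h]
      · rw [loop1_cons_ne _ _ _ _ _ _ hc, if_neg hc]
        by_cases h1 : c1 = b
        · by_cases h2 : c2 = a
          · subst h1; subst h2
            rw [if_pos rfl, if_pos rfl, loop_two t1 t2 h]
            cases hF : mismatches t1 t2 with
            | nil => simp
            | cons p r => cases p; simp
          · rw [if_pos h1, if_neg h2]
            have ha : ¬ a = c2 := fun e => h2 e.symm
            cases hF : mismatches t1 t2 with
            | nil => simp [ha]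
            | cons p r => cases p; simp
        · rw [if_neg h1]
          have hb : ¬ b = c1 := fun e => h1 e.symm
          cases hF : mismatches t1 t2 with
          | nil => simp [hb]
          | cons p r => cases p; simp

-- From the start A succeeds iff the mismatch list is exactly a swapped pair.
theorem loop_zero (l1 : List Char) : ∀ (l2 : List Char), l1.length = l2.length →
    detect_permutation_loop l1 l2 0 none none
      = (match mismatches l1 l2 with
         | [(a, b), (c, d)] => a == d && b == c
         | _ => false) := by
  induction l1 with
  | nil => intro l2 h; cases l2 <;> simp_all [detect_permutation_loop, mismatches]
  | cons c1 t1 ih =>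
    intro l2 h
    cases l2 with
    | nil => simp at h
    | cons c2 t2 =>
      simp only [List.length_cons, Nat.add_right_cancel_iff] at h
      rw [mismatches_cons]
      by_cases hc : c1 = c2
      · rw [loop_cons_eq _ _ _ _ _ _ _ hc, if_pos hc, ih t2 h]
      · rw [loop0_cons_ne _ _ _ _ hc, if_neg hc, loop_one t1 t2 h]
        cases hF : mismatches t1 t2 with
        | nil => simp
        | cons p r => cases p; cases r <;> simp

-- ===== B-side lemmas =====

theorem mismatches_self (l : List Char) : mismatches l l = [] := by
  induction l with
  | nil => rfl
  | cons c t ih => rw [mismatches_cons, if_pos rfl, ih]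

theorem mismatches_nil_iff (l1 : List Char) : ∀ l2 : List Char, l1.length = l2.length →
    (mismatches l1 l2 = [] ↔ l1 = l2) := by
  induction l1 with
  | nil => intro l2 h; cases l2 <;> simp_all [mismatches]
  | cons c1 t1 ih =>
    intro l2 h
    cases l2 with
    | nil => simp at h
    | cons c2 t2 =>
      simp only [List.length_cons, Nat.add_right_cancel_iff] at h
      rw [mismatches_cons]
      by_cases hc : c1 = c2
      · subst hc; simp [ih t2 h]
      · simp [hc]

theorem cpl_le (l1 : List Char) : ∀ l2 : List Char, common_prefix_len l1 l2 ≤ l1.length := by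
  induction l1 with
  | nil => intro l2; cases l2 <;> simp [common_prefix_len]
  | cons c1 t1 ih =>
    intro l2
    cases l2 with
    | nil => simp [common_prefix_len]
    | cons c2 t2 =>
      by_cases hc : c1 = c2 <;> simp [common_prefix_len, hc]
      exact ih t2

theorem cpl_eq_len_iff (l1 : List Char) : ∀ l2 : List Char, l1.length = l2.length →
    (common_prefix_len l1 l2 = l1.length ↔ l1 = l2) := by
  induction l1 with
  | nil => intro l2 h; cases l2 <;> simp_all [common_prefix_len]
  | cons c1 t1 ih =>
    intro l2 h
    cases l2 with
    | nil => simp at h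
    | cons c2 t2 =>
      simp only [List.length_cons, Nat.add_right_cancel_iff] at h
      by_cases hc : c1 = c2
      · subst hc; simp [common_prefix_len, ih t2 h]
      · simp [common_prefix_len, hc]

theorem cpl_take_eq (l1 : List Char) : ∀ l2 : List Char,
    l1.take (common_prefix_len l1 l2) = l2.take (common_prefix_len l1 l2) := by
  induction l1 with
  | nil => intro l2; simp [common_prefix_len]
  | cons c1 t1 ih =>
    intro l2
    cases l2 with
    | nil => simp [common_prefix_len]
    | cons c2 t2 =>
      by_cases hc : c1 = c2 <;> simp [common_prefix_len, hc]
      exact ih t2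

theorem cpl_getD_ne (l1 : List Char) : ∀ l2 : List Char,
    common_prefix_len l1 l2 < l1.length → common_prefix_len l1 l2 < l2.length →
    l1.getD (common_prefix_len l1 l2) ' ' ≠ l2.getD (common_prefix_len l1 l2) ' ' := by
  induction l1 with
  | nil => intro l2 h; simp [common_prefix_len] at h
  | cons c1 t1 ih =>
    intro l2 h1 h2
    cases l2 with
    | nil => simp at h2
    | cons c2 t2 =>
      by_cases hc : c1 = c2
      · simp only [common_prefix_len, if_pos hc, List.length_cons] at h1 h2 ⊢
        simpa using ih t2 (by omega) (by omega)
      · simp [common_prefix_len, hc]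

-- First-mismatch decomposition of the mismatch list.
theorem mismatches_decomp (l1 : List Char) : ∀ l2 : List Char, l1.length = l2.length →
    common_prefix_len l1 l2 < l1.length →
    mismatches l1 l2
      = (l1.getD (common_prefix_len l1 l2) ' ', l2.getD (common_prefix_len l1 l2) ' ')
          :: mismatches (l1.drop (common_prefix_len l1 l2 + 1)) (l2.drop (common_prefix_len l1 l2 + 1)) := by
  induction l1 with
  | nil => intro l2 h hi; simp at hi
  | cons c1 t1 ih =>
    intro l2 h hi
    cases l2 with
    | nil => simp at h
    | cons c2 t2 =>
      simp only [List.length_cons, Nat.add_right_cancel_iff] at h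
      by_cases hc : c1 = c2
      · simp only [common_prefix_len, if_pos hc, List.length_cons] at hi ⊢
        rw [mismatches_cons, if_pos hc]
        simpa using ih t2 h (by omega)
      · simp only [common_prefix_len, if_neg hc]
        rw [mismatches_cons, if_neg hc]
        simp

theorem mismatches_reverse (l1 : List Char) : ∀ l2 : List Char, l1.length = l2.length →
    mismatches l1.reverse l2.reverse = (mismatches l1 l2).reverse := by
  induction l1 with
  | nil => intro l2 h; cases l2 <;> simp_all [mismatches]
  | cons c1 t1 ih =>
    intro l2 h
    cases l2 with
    | nil => simp at h
    | cons c2 t2 =>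
      simp only [List.length_cons, Nat.add_right_cancel_iff] at h
      rw [mismatches_cons]
      have hz : (t1.reverse ++ [c1]).zip (t2.reverse ++ [c2])
          = t1.reverse.zip t2.reverse ++ [(c1, c2)] :=
        List.zip_append (by simp [h])
      by_cases hc : c1 = c2 <;>
        simp [mismatches, hz, List.filter_append, hc, ← ih t2 h, mismatches] at * <;>
        simp [mismatches, hz, List.filter_append, hc, ← ih t2 h, mismatches]
  
theorem cpl_take (l1 : List Char) : ∀ (l2 : List Char) (m : Nat),
    common_prefix_len l1 l2 < m →
    common_prefix_len (l1.take m) (l2.take m) = common_prefix_len l1 l2 := by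
  induction l1 with
  | nil => intro l2 m h; cases l2 <;> cases m <;> simp [common_prefix_len]
  | cons c1 t1 ih =>
    intro l2 m h
    cases l2 with
    | nil => cases m <;> simp [common_prefix_len]
    | cons c2 t2 =>
      cases m with
      | zero => simp [common_prefix_len] at h
      | succ m' =>
        by_cases hc : c1 = c2
        · simp only [common_prefix_len, if_pos hc] at h ⊢
          simp [List.take_succ_cons, common_prefix_len, hc, ih t2 m' (by omega)]
        · simp [List.take_succ_cons, common_prefix_len, hc]

-- Last-mismatch decomposition: with cs the common suffix length and j = n-1-cs,
-- the mismatch list splits as (mismatches before j) ++ [the mismatch at j].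
theorem mismatches_decomp_last (l1 l2 : List Char) (h : l1.length = l2.length)
    (hne : l1 ≠ l2) :
    let cs := common_prefix_len l1.reverse l2.reverse
    let j := l1.length - 1 - cs
    cs < l1.length ∧ j < l1.length ∧ j = l1.length - 1 - cs ∧ cs = l1.length - 1 - j ∧
    l1.getD j ' ' ≠ l2.getD j ' ' ∧
    mismatches l1 l2 = mismatches (l1.take j) (l2.take j) ++ [(l1.getD j ' ', l2.getD j ' ')] := by
  intro cs j
  have hlenr : l1.reverse.length = l2.reverse.length := by simp [h]
  have hner : l1.reverse ≠ l2.reverse := by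
    intro e; exact hne (by simpa using congrArg List.reverse e)
  have hcs_le : cs ≤ l1.reverse.length := cpl_le _ _
  have hcs_lt : cs < l1.length := by
    rcases Nat.lt_or_ge cs l1.reverse.length with hlt | hge
    · simpa using hlt
    · exfalso
      have : cs = l1.reverse.length := le_antisymm hcs_le hge
      exact hner ((cpl_eq_len_iff _ _ hlenr).mp this)
  have hj_lt : j < l1.length := by omega
  have hcs_eq : cs = l1.length - 1 - j := by omega
  have hdec := mismatches_decomp l1.reverse l2.reverse hlenr (by simpa using hcs_lt)
  -- reverse index ↦ original index
  have hg1 : l1.reverse.getD cs ' ' = l1.getD j ' ' := by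
    have h1 : cs < l1.reverse.length := by simpa using hcs_lt
    rw [List.getD_eq_getElem _ _ h1, List.getElem_reverse,
        List.getD_eq_getElem _ _ (by simpa using hj_lt)]
  have hg2 : l2.reverse.getD cs ' ' = l2.getD j ' ' := by
    have h1 : cs < l2.reverse.length := by rw [← hlenr]; simpa using hcs_lt
    rw [List.getD_eq_getElem _ _ h1, List.getElem_reverse,
        List.getD_eq_getElem _ _ (by simp [← h]; omega)]
    congr 1
    simp [← h]; omega
  have hd1 : l1.reverse.drop (cs + 1) = (l1.take j).reverse := by
    rw [List.reverse_take]
    congr 1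
    omega
  have hd2 : l2.reverse.drop (cs + 1) = (l2.take j).reverse := by
    rw [List.reverse_take]
    congr 1
    omega
  rw [mismatches_reverse l1 l2 h, hg1, hg2, hd1, hd2,
      mismatches_reverse (l1.take j) (l2.take j) (by simp [h])] at hdec
  have hmain : mismatches l1 l2
      = mismatches (l1.take j) (l2.take j) ++ [(l1.getD j ' ', l2.getD j ' ')] := by
    have := congrArg List.reverse hdec
    simpa using this
  have hgj : l1.getD j ' ' ≠ l2.getD j ' ' := by
    rw [← hg1, ← hg2]
    exact cpl_getD_ne l1.reverse l2.reverse (by simpa using hcs_lt) (by rw [← hlenr]; simpa using hcs_lt)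
  exact ⟨hcs_lt, hj_lt, rfl, hcs_eq, hgj, hmain⟩

theorem getD_take_agree (l1 l2 : List Char) (i k : Nat) (hk : k < i)
    (htk : l1.take i = l2.take i) (h1 : k < l1.length) (h2 : k < l2.length) :
    l1.getD k ' ' = l2.getD k ' ' := by
  have : (l1.take i).getD k ' ' = (l2.take i).getD k ' ' := by rw [htk]
  rwa [List.getD_eq_getElem _ _ (by simp; omega), List.getD_eq_getElem _ _ (by simp; omega),
       List.getElem_take, List.getElem_take,
       ← List.getD_eq_getElem l1 _ h1, ← List.getD_eq_getElem l2 _ h2] at this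

theorem getD_drop (l : List Char) (k m : Nat) :
    (l.drop k).getD m ' ' = l.getD (k + m) ' ' := by
  simp [List.getD, List.getElem?_drop]

-- ===== VERDICT proof core =====

theorem core_eq (l1 l2 : List Char) (h : l1.length = l2.length) :
    detect_permutation_loop l1 l2 0 none none
      = (if common_prefix_len l1 l2 = l1.length then false
         else
           let n := l1.length
           let i := common_prefix_len l1 l2
           let j := n - 1 - common_prefix_len l1.reverse l2.reverse
           if j = i then false
           else
             (l1.getD i ' ' == l2.getD j ' ') && (l1.getD j ' ' == l2.getD i ' ')
               && ((l1.drop (i+1)).take (j - (i+1)) == (l2.drop (i+1)).take (j - (i+1)))) := by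
  rw [loop_zero l1 l2 h]
  by_cases heq : l1 = l2
  · subst heq
    rw [if_pos ((cpl_eq_len_iff l1 l1 rfl).mpr rfl), mismatches_self]
  · have hi_ne : common_prefix_len l1 l2 ≠ l1.length :=
      fun e => heq ((cpl_eq_len_iff l1 l2 h).mp e)
    have hi_lt : common_prefix_len l1 l2 < l1.length :=
      lt_of_le_of_ne (cpl_le l1 l2) hi_ne
    rw [if_neg hi_ne]
    set i := common_prefix_len l1 l2 with hi_def
    obtain ⟨hcs_lt, hj_lt, _, hcs_eq, hgj_ne, hsplit⟩ := mismatches_decomp_last l1 l2 h heq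
    set cs := common_prefix_len l1.reverse l2.reverse with hcs_def
    set j := l1.length - 1 - cs with hj_def
    have hfirst := mismatches_decomp l1 l2 h hi_lt
    -- i ≤ j: indices below i agree (common prefix), but l1[j] ≠ l2[j]
    have hij_le : i ≤ j := by
      by_contra hlt
      exact hgj_ne (getD_take_agree l1 l2 i j (Nat.lt_of_not_le hlt) (cpl_take_eq l1 l2) hj_lt (by omega))
    by_cases hji : j = i
    · -- single mismatch: both sides false
      rw [if_pos hji]
      have htk : l1.take j = l2.take j := by rw [hji]; exact cpl_take_eq l1 l2
      have : mismatches (l1.take j) (l2.take j) = [] := by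
        rw [htk]; exact mismatches_self _
      rw [this] at hsplit
      rw [hsplit]
      rfl
    · rw [if_neg hji]
      have hij_lt : i < j := lt_of_le_of_ne hij_le (fun e => hji e.symm)
      -- last-mismatch decomposition of the dropped tails
      have hd_len : (l1.drop (i+1)).length = (l2.drop (i+1)).length := by simp [h]
      have hd_ne : l1.drop (i+1) ≠ l2.drop (i+1) := by
        intro e
        apply hgj_ne
        have : (l1.drop (i+1)).getD (j - (i+1)) ' ' = (l2.drop (i+1)).getD (j - (i+1)) ' ' := by rw [e]
        rwa [getD_drop, getD_drop, Nat.add_sub_cancel' (show i + 1 ≤ j by omega)] at this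
      obtain ⟨hcs'_lt, hj'_lt, _, _, hgj'_ne, hsplit'⟩ :=
        mismatches_decomp_last (l1.drop (i+1)) (l2.drop (i+1)) hd_len hd_ne
      -- common suffix length of the tails equals cs
      have hrevdrop1 : (l1.drop (i+1)).reverse = l1.reverse.take (l1.length - (i+1)) := by
        rw [List.reverse_drop]
      have hrevdrop2 : (l2.drop (i+1)).reverse = l2.reverse.take (l2.length - (i+1)) := by
        rw [List.reverse_drop]
      have hcs' : common_prefix_len (l1.drop (i+1)).reverse (l2.drop (i+1)).reverse = cs := by
        rw [hrevdrop1, hrevdrop2, ← h]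
        exact cpl_take l1.reverse l2.reverse (l1.length - (i+1)) (by omega)
      rw [hcs'] at hsplit' hgj'_ne
      have hdlen1 : (l1.drop (i+1)).length = l1.length - (i+1) := by simp
      rw [hdlen1] at hsplit' hgj'_ne
      have hjr : l1.length - (i+1) - 1 - cs = j - (i+1) := by omega
      rw [hjr] at hsplit' hgj'_ne
      rw [getD_drop, getD_drop, Nat.add_sub_cancel' (by omega)] at hsplit'
      -- assemble the mismatch list
      rw [hsplit'] at hfirst
      rw [hfirst]
      -- the middle slices
      set m1 := (l1.drop (i+1)).take (j - (i+1)) with hm1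
      set m2 := (l2.drop (i+1)).take (j - (i+1)) with hm2
      have hmlen : m1.length = m2.length := by simp [hm1, hm2, h]
      by_cases hmid : mismatches m1 m2 = []
      · have hmeq : m1 = m2 := (mismatches_nil_iff m1 m2 hmlen).mp hmid
        rw [hmid]
        simp only [List.nil_append]
        simp [hmeq, Bool.and_comm, BEq.comm, ← hj_def, ← hi_def]
      · have hmne : m1 ≠ m2 := fun e => hmid (by rw [e]; exact mismatches_self _)
        cases hM : mismatches m1 m2 with
        | nil => exact absurd hM hmid
        | cons p r =>
          cases p
          simp [hmne]

-- ===== VERDICT (by name: the statement is the Claim_ definition above) =====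
theorem detect_permutation_spec : Claim_equal_detect_permutation := by
  intro str1 str2 _
  unfold Spec_detect_permutation detect_permutation detect_permutation_alt
  by_cases h : str1.toList.length = str2.toList.length
  · rw [if_neg (by simpa using h), if_neg (by simpa using h)]
    simpa using core_eq str1.toList str2.toList h
  · rw [if_pos h, if_pos h]
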